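-- pv_equiv track=rewrite | github.com/airmang/python-hwpx | tests/template_automation/helpers.py | find_normalized_range
-- ===== SOURCE A (Python) =====
-- def normalize_whitespace(value: str) -> str:
--     return "".join(value.split())
--
-- def find_normalized_range(text: str, query: str) -> tuple[int, int] | None:
--     normalized_query = normalize_whitespace(query)
--     if not normalized_query:
--         raise ValueError("query must contain at least one non-whitespace character")
--
--     normalized_chars: list[str] = []
--     index_map: list[int] = []
--     for index, char in enumerate(text):
--         if char.isspace():
--             continue
--         normalized_chars.append(char)
--         index_map.append(index)
--
--     normalized_text = "".join(normalized_chars)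
--     start = normalized_text.find(normalized_query)
--     if start == -1:
--         return None
--     end = start + len(normalized_query) - 1
--     return index_map[start], index_map[end] + 1
-- ===== SOURCE B (Python) =====
-- def find_normalized_range(text, query):
--     nq = [c for c in query if not c.isspace()]
--     if not nq:
--         raise ValueError("query must contain at least one non-whitespace character")
--     n = len(text)
--
--     def match_at(i):
--         # try to match nq starting at text[i], skipping whitespace between chars;
--         # returns the index one past the last matched character, or None
--         j = i
--         for c in nq:
--             while j < n and text[j].isspace():
--                 j += 1
--             if j >= n or text[j] != c:
--                 return None
--             j += 1
--         return j
--
--     for i in range(n):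
--         if text[i].isspace():
--             continue
--         end = match_at(i)
--         if end is not None:
--             return (i, end)
--     return None
-- ===== Notes on version B (the rewrite author's own statement) =====
-- stated objective: alternative
-- what changed: B drops A's normalize-then-find pipeline (building a whitespace-stripped copy of the text plus an index_map and running str.find on it) and instead scans the original text directly, attempting at each non-whitespace position to match the normalized query in place while skipping whitespace, so no normalized string or index map is ever built.
import Mathlib
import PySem

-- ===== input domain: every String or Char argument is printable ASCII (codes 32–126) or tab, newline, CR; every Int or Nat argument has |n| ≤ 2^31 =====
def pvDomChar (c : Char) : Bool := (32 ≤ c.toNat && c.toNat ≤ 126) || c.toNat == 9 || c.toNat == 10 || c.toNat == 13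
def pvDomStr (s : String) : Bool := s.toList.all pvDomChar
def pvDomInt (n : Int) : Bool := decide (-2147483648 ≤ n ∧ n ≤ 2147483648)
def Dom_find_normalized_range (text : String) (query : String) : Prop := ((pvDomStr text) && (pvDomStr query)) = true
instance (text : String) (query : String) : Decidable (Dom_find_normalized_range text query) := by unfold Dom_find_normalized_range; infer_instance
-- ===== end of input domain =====

-- B replaces A's normalize-then-str.find pipeline (normalized copy of the text + index_map) by a
-- direct scan of the original text that matches the normalized query in place, skipping whitespace.
-- Equivalence of the RETURN value is proved on Pre_ (A raises ValueError on whitespace-only queries).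

-- ===== PORT A =====
-- normalize_whitespace(value) = "".join(value.split())
def pv_normalize_whitespace (value : String) : String :=
  PySem.Str.join "" (PySem.Str.split₀ value)

def find_normalized_range (text : String) (query : String) : Option (Int × Int) :=
  let normalized_query := pv_normalize_whitespace query
  if PySem.Str.len normalized_query = 0 then none   -- Python: raise ValueError (excluded by Pre_)
  else
    -- for index, char in enumerate(text): if char.isspace(): continue; append to both lists
    let acc := (PySem.List.enumerate text.toList 0).foldl
      (fun (acc : List Char × List Int) ic =>
        if PySem.Chars.isspace ic.2 then acc else (acc.1 ++ [ic.2], acc.2 ++ [ic.1]))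
      ([], [])
    let normalized_text := acc.1   -- "".join of single-char strings = the string of those chars
    let index_map := acc.2
    let start := PySem.Chars.find normalized_text normalized_query.toList
    if start = -1 then none
    else
      let endIdx := start + PySem.Str.len normalized_query - 1
      match PySem.List.pyGet? index_map start, PySem.List.pyGet? index_map endIdx with
      | some a, some b => some (a, b + 1)
      | _, _ => none    -- unreachable: IndexError cannot happen when find succeeded

-- ===== PORT B =====
-- match_at: try to match nq from position pos on, skipping whitespace between characters;
-- returns the index one past the last matched character, or none.
def pvMatchAt : List Char → Int → List Char → Option Int
  | [], pos, _ => some pos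
  | _ :: _, _, [] => none
  | c :: qs, pos, t :: ts =>
    if PySem.Chars.isspace t then pvMatchAt (c :: qs) (pos + 1) ts
    else if t = c then pvMatchAt qs (pos + 1) ts
    else none

-- the outer 'for i in range(n)' loop: skip whitespace starts, try match_at, first hit wins
def pvScan (q : List Char) : Int → List Char → Option (Int × Int)
  | _, [] => none
  | pos, t :: ts =>
    if PySem.Chars.isspace t then pvScan q (pos + 1) ts
    else
      match pvMatchAt q pos (t :: ts) with
      | some e => some (pos, e)
      | none => pvScan q (pos + 1) ts

def find_normalized_range_alt (text : String) (query : String) : Option (Int × Int) :=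
  let nq := query.toList.filter (fun c => !PySem.Chars.isspace c)
  if nq = [] then none   -- Python: raise ValueError (excluded by Pre_)
  else pvScan nq 0 text.toList

-- ===== PRECONDITION & SPEC =====
-- Pre_ excludes exactly the queries with no non-whitespace character, on which A raises ValueError.
def Pre_find_normalized_range (text : String) (query : String) : Prop :=
  query.toList.filter (fun c => !PySem.Chars.isspace c) ≠ []
instance (text : String) (query : String) : Decidable (Pre_find_normalized_range text query) := by
  unfold Pre_find_normalized_range; infer_instance

def pvWitness_find_normalized_range : String × String := ("a  b c", "b c")

def Spec_find_normalized_range (text : String) (query : String) (out : Option (Int × Int)) : Prop :=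
  out = find_normalized_range_alt text query
instance (text : String) (query : String) (out : Option (Int × Int)) :
    Decidable (Spec_find_normalized_range text query out) := by
  unfold Spec_find_normalized_range; infer_instance

-- ===== CLAIM (what is proved, stated in full; the proofs are below) =====
def Claim_equal_find_normalized_range : Prop :=
  ∀ (text : String) (query : String), Dom_find_normalized_range text query →
    Pre_find_normalized_range text query →
    Spec_find_normalized_range text query (find_normalized_range text query)

-- ===== LEMMAS AND PROOFS =====

-- the list of (index, char) pairs of the non-whitespace characters, used to relate both ports
def pvPairs : Int → List Char → List (Int × Char)
  | _, [] => []
  | pos, t :: ts =>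
    if PySem.Chars.isspace t then pvPairs (pos + 1) ts
    else (pos, t) :: pvPairs (pos + 1) ts

-- abstract version of B's scan, working on the filtered (index, char) pairs
def pvScanP (q : List Char) : List (Int × Char) → Option (Int × Int)
  | [] => none
  | p :: ps =>
    if q <+: (p :: ps).map Prod.snd then
      some (p.1, ((p :: ps).getD (q.length - 1) (0, ' ')).1 + 1)
    else pvScanP q ps

-- "".join(s.split()) removes exactly the whitespace characters
theorem pv_go_flatten (rest : List Char) : ∀ (cur : List Char) (acc : List (List Char)),
    (PySem.Chars.split₀.go rest cur acc).flatten
      = acc.reverse.flatten ++ cur.reverse ++ rest.filter (fun c => !PySem.Chars.isspace c) := by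
  induction rest with
  | nil =>
    intro cur acc
    by_cases h : cur = [] <;>
      simp [PySem.Chars.split₀.go, h]
  | cons c rest ih =>
    intro cur acc
    by_cases hs : PySem.Chars.isspace c
    · by_cases h : cur = [] <;>
        simp [PySem.Chars.split₀.go, hs, h, ih]
    · simp [PySem.Chars.split₀.go, hs, ih]

theorem pv_flatten_intersperse_nil (l : List (List Char)) :
    (l.intersperse ([] : List Char)).flatten = l.flatten := by
  induction l with
  | nil => simp
  | cons a t ih =>
    cases t with
    | nil => simp
    | cons b t' => simp [List.intersperse_cons₂, ih]

theorem pv_join_split₀ (cs : List Char) :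
    PySem.Chars.join [] (PySem.Chars.split₀ cs) = cs.filter (fun c => !PySem.Chars.isspace c) := by
  simp only [PySem.Chars.join, List.intercalate, pv_flatten_intersperse_nil]
  simpa [PySem.Chars.split₀] using pv_go_flatten cs [] []

theorem pv_normalize_toList (value : String) :
    (pv_normalize_whitespace value).toList = value.toList.filter (fun c => !PySem.Chars.isspace c) := by
  rw [pv_normalize_whitespace, PySem.Str.toList_join, PySem.Str.split₀_map_toList]
  simpa using pv_join_split₀ value.toList

-- A's accumulation loop builds exactly the two projections of pvPairs
theorem pv_fold_pairs (L : List Char) : ∀ (pos : Int) (accC : List Char) (accI : List Int),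
    (PySem.List.enumerate L pos).foldl
      (fun (acc : List Char × List Int) ic =>
        if PySem.Chars.isspace ic.2 then acc else (acc.1 ++ [ic.2], acc.2 ++ [ic.1]))
      (accC, accI)
    = (accC ++ (pvPairs pos L).map Prod.snd, accI ++ (pvPairs pos L).map Prod.fst) := by
  induction L with
  | nil => intro pos accC accI; simp [PySem.List.enumerate, pvPairs]
  | cons t ts ih =>
    intro pos accC accI
    by_cases hs : PySem.Chars.isspace t <;>
      simp [PySem.List.enumerate, pvPairs, hs, ih]

-- B's match_at is matching against the filtered pairs
theorem pv_matchAt_eq (rest : List Char) : ∀ (q : List Char) (pos : Int), q ≠ [] →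
    pvMatchAt q pos rest
      = (if q <+: (pvPairs pos rest).map Prod.snd then
           some (((pvPairs pos rest).getD (q.length - 1) (0, ' ')).1 + 1)
         else none) := by
  induction rest with
  | nil =>
    intro q pos hq
    match q with
    | c :: qs => simp [pvMatchAt, pvPairs]
  | cons t ts ih =>
    intro q pos hq
    match q with
    | c :: qs =>
      by_cases hs : PySem.Chars.isspace t
      · simpa [pvMatchAt, pvPairs, hs] using ih (c :: qs) (pos + 1) hq
      · have hpairs : pvPairs pos (t :: ts) = (pos, t) :: pvPairs (pos + 1) ts := by
          simp [pvPairs, hs]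
        rw [hpairs]
        by_cases htc : t = c
        · subst htc
          match qs with
          | [] => simp [pvMatchAt, hs, List.cons_prefix_cons]
          | q' :: qs' =>
            have ih' := ih (q' :: qs') (pos + 1) (by simp)
            rw [pvMatchAt, if_neg (by simp [hs]), if_pos rfl, ih']
            simp only [List.map_cons, List.length_cons]
            by_cases hp : (q' :: qs') <+: (pvPairs (pos + 1) ts).map Prod.snd
            · rw [if_pos (by simpa using hp), if_pos (List.cons_prefix_cons.mpr ⟨rfl, hp⟩)]
              have h1 : (q' :: qs').length - 1 = qs'.length := by simp
              have h2 : qs'.length + 1 + 1 - 1 = qs'.length + 1 := by omega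
              rw [h2, List.getD_cons_succ]
              simp
            · rw [if_neg (by simpa using hp),
                  if_neg (by rw [List.cons_prefix_cons]; rintro ⟨_, h⟩; exact hp h)]
        · have hne : (c : Char) ≠ t := fun h => htc h.symm
          simp [pvMatchAt, hs, htc, List.cons_prefix_cons, hne]

-- B's scan is the abstract scan over the filtered pairs
theorem pv_scan_eq (rest : List Char) : ∀ (q : List Char) (pos : Int), q ≠ [] →
    pvScan q pos rest = pvScanP q (pvPairs pos rest) := by
  induction rest with
  | nil => intro q pos hq; simp [pvScan, pvPairs, pvScanP]
  | cons t ts ih =>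
    intro q pos hq
    by_cases hs : PySem.Chars.isspace t
    · simpa [pvScan, pvPairs, hs] using ih q (pos + 1) hq
    · have hpairs : pvPairs pos (t :: ts) = (pos, t) :: pvPairs (pos + 1) ts := by
        simp [pvPairs, hs]
      rw [pvScan, if_neg (by simp [hs]), pv_matchAt_eq (t :: ts) q pos hq, hpairs]
      by_cases hp : q <+: t :: (pvPairs (pos + 1) ts).map Prod.snd
      · simp [pvScanP, hp]
      · simp [pvScanP, hp, ih q (pos + 1) hq]

-- one step of Chars.find on a cons cell, derived from the find_spec characterisation
theorem pv_find_cons (a : Char) (S Q : List Char) :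
    PySem.Chars.find (a :: S) Q
      = (if Q <+: a :: S then 0
         else if PySem.Chars.find S Q = -1 then -1 else PySem.Chars.find S Q + 1) := by
  by_cases hp : Q <+: a :: S
  · rw [if_pos hp]
    have hnn : 0 ≤ PySem.Chars.find (a :: S) Q :=
      (PySem.Chars.find_nonneg_iff _ _).mpr (hp.isInfix)
    have hspec := PySem.Chars.find_spec hnn
    rcases Nat.eq_zero_or_pos (PySem.Chars.find (a :: S) Q).toNat with h0 | h0
    · omega
    · exact absurd (by simpa using hspec.2 0 h0) (by simp [hp])
  · rw [if_neg hp]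
    by_cases hm : PySem.Chars.find S Q = -1
    · rw [if_pos hm]
      have hni : ¬ Q <:+: S := (PySem.Chars.find_eq_neg_one_iff _ _).mp hm
      exact (PySem.Chars.find_eq_neg_one_iff _ _).mpr (by
        rw [List.infix_cons_iff]; rintro (h | h); exacts [hp h, hni h])
    · rw [if_neg hm]
      have hnn' : 0 ≤ PySem.Chars.find S Q := by
        have := PySem.Chars.neg_one_le_find S Q; omega
      have hspec' := PySem.Chars.find_spec hnn'
      set s' := (PySem.Chars.find S Q).toNat with hs'
      have hinf : Q <:+: a :: S :=
        List.infix_cons_iff.mpr (.inr (hspec'.1.isInfix.trans (List.drop_suffix s' S).isInfix))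
      have hnn : 0 ≤ PySem.Chars.find (a :: S) Q := (PySem.Chars.find_nonneg_iff _ _).mpr hinf
      have hspec := PySem.Chars.find_spec hnn
      set s := (PySem.Chars.find (a :: S) Q).toNat with hs
      have h1 : s ≠ 0 := by
        intro h0; exact hp (by simpa [h0] using hspec.1)
      have h2 : s ≤ s' + 1 := by
        by_contra h
        exact hspec.2 (s' + 1) (by omega) (by simpa using hspec'.1)
      have h3 : ¬ s < s' + 1 := by
        intro h
        obtain ⟨j, hj⟩ : ∃ j, s = j + 1 := ⟨s - 1, by omega⟩
        have h5 := hspec.1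
        rw [hj] at h5
        exact hspec'.2 j (by omega) (by simpa using h5)
      omega

-- the abstract scan computes exactly what A computes from find on the filtered text
theorem pv_scanP_find (Q : List Char) (hQne : Q ≠ []) (F : List (Int × Char)) :
    pvScanP Q F
      = (if _h : Q <:+: F.map Prod.snd then
           some ((F.getD (PySem.Chars.find (F.map Prod.snd) Q).toNat (0, ' ')).1,
                 (F.getD ((PySem.Chars.find (F.map Prod.snd) Q).toNat + Q.length - 1) (0, ' ')).1 + 1)
         else none) := by
  induction F with
  | nil =>
    have hni : ¬ Q <:+: (([] : List (Int × Char)).map Prod.snd) := by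
      simp only [List.map_nil]
      intro h
      exact hQne (List.infix_nil.mp h)
    rw [pvScanP, dif_neg hni]
  | cons p ps ih =>
    rw [pvScanP]
    simp only [List.map_cons]
    have hfc := pv_find_cons p.2 (ps.map Prod.snd) Q
    by_cases hp : Q <+: p.2 :: ps.map Prod.snd
    · rw [if_pos hp]
      have hinf : Q <:+: p.2 :: ps.map Prod.snd := hp.isInfix
      rw [dif_pos hinf]
      have h0 : PySem.Chars.find (p.2 :: ps.map Prod.snd) Q = 0 := hfc.trans (if_pos hp)
      rw [h0]
      simp
    · rw [if_neg hp, ih]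
      by_cases hi : Q <:+: ps.map Prod.snd
      · rw [dif_pos hi, dif_pos (List.infix_cons_iff.mpr (Or.inr hi))]
        have hm : PySem.Chars.find (ps.map Prod.snd) Q ≠ -1 :=
          (PySem.Chars.find_ne_neg_one_iff (ps.map Prod.snd) Q).mpr hi
        have hval : PySem.Chars.find (p.2 :: ps.map Prod.snd) Q
            = PySem.Chars.find (ps.map Prod.snd) Q + 1 := by
          rw [hfc, if_neg hp, if_neg hm]
        have hnn' : 0 ≤ PySem.Chars.find (ps.map Prod.snd) Q := by
          have := PySem.Chars.neg_one_le_find (ps.map Prod.snd) Q; omega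
        have htn : (PySem.Chars.find (p.2 :: ps.map Prod.snd) Q).toNat
            = (PySem.Chars.find (ps.map Prod.snd) Q).toNat + 1 := by omega
        have hQ1 : 1 ≤ Q.length := by
          cases Q with | nil => exact absurd rfl hQne | cons _ _ => simp
        rw [htn, List.getD_cons_succ]
        have harith : (PySem.Chars.find (ps.map Prod.snd) Q).toNat + 1 + Q.length - 1
            = ((PySem.Chars.find (ps.map Prod.snd) Q).toNat + Q.length - 1) + 1 := by omega
        rw [harith, List.getD_cons_succ]
      · rw [dif_neg hi, dif_neg (by
          rw [List.infix_cons_iff]; rintro (h | h) <;> [exact hp h; exact hi h])]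

-- indexing the fst-projection list
theorem pv_getD_map_fst (F : List (Int × Char)) (k : Nat) (hk : k < F.length) :
    PySem.List.pyGet? (F.map Prod.fst) (k : Int) = some (F.getD k (0, ' ')).1 := by
  rw [PySem.List.pyGet?_natCast]
  rw [List.getElem?_map, List.getElem?_eq_getElem hk]
  simp [List.getD, List.getElem?_eq_getElem hk]

-- ===== VERDICT (by name: the statement is the Claim_ definition above) =====
theorem find_normalized_range_spec : Claim_equal_find_normalized_range := by
  intro text query _hdom hpre
  unfold Spec_find_normalized_range
  unfold Pre_find_normalized_range at hpre
  set Q := query.toList.filter (fun c => !PySem.Chars.isspace c) with hQdef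
  have hnq : (pv_normalize_whitespace query).toList = Q := pv_normalize_toList query
  have hlen : PySem.Str.len (pv_normalize_whitespace query) = (Q.length : Int) := by
    rw [PySem.Str.len_eq, ← hnq]
  have hQ1 : 1 ≤ Q.length := by
    cases hQe : Q with
    | nil => exact absurd hQe hpre
    | cons _ _ => simp
  have hQ0 : ¬ ((Q.length : Int) = 0) := by
    intro h; omega
  simp only [find_normalized_range, find_normalized_range_alt, hlen, hnq,
             pv_fold_pairs text.toList 0 [] [], List.nil_append]
  rw [if_neg hQ0, if_neg hpre]
  rw [pv_scan_eq text.toList Q 0 hpre, pv_scanP_find Q hpre (pvPairs 0 text.toList)]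
  set F := pvPairs 0 text.toList with hF
  by_cases hi : Q <:+: F.map Prod.snd
  · rw [dif_pos hi]
    have hnn : 0 ≤ PySem.Chars.find (F.map Prod.snd) Q :=
      (PySem.Chars.find_nonneg_iff _ _).mpr hi
    have hne : ¬ (PySem.Chars.find (F.map Prod.snd) Q = -1) := by omega
    rw [if_neg hne]
    set s := (PySem.Chars.find (F.map Prod.snd) Q).toNat with hs
    have hbound : s + Q.length ≤ F.length := by
      have hdrop := (PySem.Chars.find_spec hnn).1
      have := hdrop.length_le
      simp only [List.length_drop, List.length_map] at this
      omega
    have hcast : PySem.Chars.find (F.map Prod.snd) Q = (s : Int) := by omega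
    have hidx2 : (s : Int) + (Q.length : Int) - 1 = ((s + Q.length - 1 : Nat) : Int) := by
      omega
    rw [hcast, hidx2,
        pv_getD_map_fst F s (by omega), pv_getD_map_fst F (s + Q.length - 1) (by omega)]
  · rw [dif_neg hi]
    have hm : PySem.Chars.find (F.map Prod.snd) Q = -1 :=
      (PySem.Chars.find_eq_neg_one_iff _ _).mpr hi
    rw [if_pos hm]
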